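-- pv_equiv track=rewrite | github.com/JOBEBOLDER/leetcode_solutions | python/dfs/3481. Apply Substitutions.py | applySubstitutions
-- ===== SOURCE A (Python) =====
-- from typing import List
--
-- def applySubstitutions(replacements: List[List[str]], text: str) -> str:
--     # 构建替换映射
--     mp = {k: v for k, v in replacements}
--     memo = {}  # 记忆化展开结果
--     visiting = set()  # 环检测
--
--     def dfs(var: str) -> str:
--         """递归展开变量的值"""
--         # 如果变量不在映射中，返回原样（带$符号）
--         if var not in mp:
--             return f"%{var}%"
--
--         # 如果已经计算过，直接返回结果
--         if var in memo:
--             return memo[var]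
--
--         # 如果正在访问中（检测到环），返回原样
--         if var in visiting:
--             # 注意：检测到环时不要存入memo，因为这不是最终结果
--             return f"%{var}%"
--
--         # 标记正在访问
--         visiting.add(var)
--         # 递归展开变量的值
--         expanded = expand_value(mp[var])
--         # 取消访问标记
--         visiting.remove(var)
--
--         # 只有成功展开（没有环）时才缓存结果
--         memo[var] = expanded
--         return expanded
--
--     def expand_value(s: str) -> str:
--         """展开字符串中的所有 $var$ 占位符"""
--         result = []
--         i = 0
--         n = len(s)
--
--         while i < n:
--             if s[i] == '%':
--                 # 寻找配对的 $
--                 j = i + 1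
--                 # 找到下一个 $ 的位置
--                 while j < n and s[j] != '%':
--                     j += 1
--
--                 if j < n:  # 找到了配对的 $
--                     var_name = s[i+1:j]
--                     if var_name:  # 变量名不为空
--                         # 递归展开这个变量
--                         result.append(dfs(var_name))
--                         i = j + 1  # 跳过整个 $var$
--                     else:
--                         # $$ 的情况，当作普通字符处理
--                         result.append('%')
--                         i += 1
--                 else:
--                     # 没有找到配对的 $，当作普通字符
--                     result.append('%')
--                     i += 1
--             else:
--                 # 普通字符，直接添加
--                 result.append(s[i])
--                 i += 1
--
--         return ''.join(result)
--
--     # 对输入文本进行展开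
--     return expand_value(text)
-- ===== SOURCE B (Python) =====
-- from typing import List
--
-- def applySubstitutions(replacements: List[List[str]], text: str) -> str:
--     # Parse each value ONCE into a token list: ('v', name) = variable reference,
--     # plain 1-char string = literal character; then expand over tokens.
--     def tokenize(s):
--         toks = []
--         rest = s
--         while rest:
--             if rest[0] == '%':
--                 body = rest[1:]
--                 name = body.split('%', 1)[0]
--                 if len(name) < len(body) and name:
--                     toks.append(('v', name))
--                     rest = body[len(name) + 1:]
--                 else:
--                     toks.append('%')
--                     rest = body
--             else:
--                 toks.append(rest[0])
--                 rest = rest[1:]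
--         return toks
--
--     table = {}
--     for pair in replacements:
--         k, v = pair
--         table[k] = tokenize(v)
--
--     memo = {}
--     visiting = set()
--
--     def expand(toks):
--         out = []
--         for tok in toks:
--             if isinstance(tok, tuple):
--                 out.append(dfs(tok[1]))
--             else:
--                 out.append(tok)
--         return ''.join(out)
--
--     def dfs(var):
--         if var not in table:
--             return f"%{var}%"
--         if var in memo:
--             return memo[var]
--         if var in visiting:
--             return f"%{var}%"
--         visiting.add(var)
--         res = expand(table[var])
--         visiting.remove(var)
--         memo[var] = res
--         return res
--
--     return expand(tokenize(text))
-- ===== Notes on version B (the rewrite author's own statement) =====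
-- stated objective: alternative
-- what changed: B tokenizes the text and each replacement value once into a list of literal/variable-reference tokens stored in a parse table, then runs the memoized cycle-detecting expansion over token lists instead of re-scanning raw strings with an index loop on every visit.
-- outside the precondition, e.g. on applySubstitutions([['a']], 'x'): A raises ValueError, B raises ValueError
import Mathlib
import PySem

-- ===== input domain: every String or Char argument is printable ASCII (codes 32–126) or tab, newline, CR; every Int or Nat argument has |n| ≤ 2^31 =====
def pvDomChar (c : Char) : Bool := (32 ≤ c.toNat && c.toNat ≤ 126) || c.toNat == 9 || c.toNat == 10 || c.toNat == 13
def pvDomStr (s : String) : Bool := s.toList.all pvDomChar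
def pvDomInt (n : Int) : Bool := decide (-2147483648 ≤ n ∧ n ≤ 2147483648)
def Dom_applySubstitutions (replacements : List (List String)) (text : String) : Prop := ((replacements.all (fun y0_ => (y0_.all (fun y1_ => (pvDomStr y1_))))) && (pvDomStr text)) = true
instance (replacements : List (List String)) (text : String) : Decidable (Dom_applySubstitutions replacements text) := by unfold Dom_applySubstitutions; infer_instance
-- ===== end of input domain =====

-- B parses every replacement value (and the text) ONCE into a token list and runs the
-- memoized cycle-detecting expansion over tokens instead of re-scanning strings (objective: alternative).

-- ===== PORT A =====
-- A's expand_value: the '%'-scanning index loop, with the recursive dfs passed in as the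
-- callback `dfsf` (in Python a closure) and the mutable memo threaded explicitly.
def pvExpandA
    (dfsf : PySem.Dict (List Char) (List Char) → List Char →
      List Char × PySem.Dict (List Char) (List Char))
    (memo : PySem.Dict (List Char) (List Char)) (cs : List Char) :
    List Char × PySem.Dict (List Char) (List Char) :=
  match cs with
  | [] => ([], memo)
  | c :: rest =>
    if c = '%' then
      let name := rest.takeWhile (· ≠ '%')              -- the j-scan for the closing '%'
      if name.length < rest.length then                 -- j < n: found it
        if name ≠ [] then
          let p := dfsf memo name
          let q := pvExpandA dfsf p.2 (rest.drop (name.length + 1))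
          (p.1 ++ q.1, q.2)
        else                                            -- '%%': literal '%', advance 1
          let q := pvExpandA dfsf memo rest
          ('%' :: q.1, q.2)
      else                                              -- unmatched '%': literal, advance 1
        let q := pvExpandA dfsf memo rest
        ('%' :: q.1, q.2)
    else
      let q := pvExpandA dfsf memo rest
      (c :: q.1, q.2)
termination_by cs.length
decreasing_by all_goals (simp only [List.length_drop, List.length_cons]; omega)

-- A's dfs: not-in-map / memo-hit / cycle checks, then expand the value with var marked visiting
-- and cache the result; fuel only bounds the recursion depth (never exhausted: the depth is
-- bounded by the number of keys, hence by replacements.length < the initial fuel).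
def pvDfsA (fuel : Nat) (mp : PySem.Dict (List Char) (List Char))
    (vis : PySem.Set (List Char)) (memo : PySem.Dict (List Char) (List Char))
    (var : List Char) : List Char × PySem.Dict (List Char) (List Char) :=
  match mp.get? var with
  | none => ('%' :: var ++ ['%'], memo)                 -- var not in mp
  | some val =>
    match memo.get? var with
    | some r => (r, memo)                               -- memo hit
    | none =>
      if var ∈ vis then ('%' :: var ++ ['%'], memo)     -- cycle detected
      else
        match fuel with
        | 0 => ([], memo)                               -- unreachable with the chosen fuel
        | f + 1 =>
          let p := pvExpandA (pvDfsA f mp (PySem.Set.add vis var)) memo val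
          (p.1, p.2.insert var p.1)

def pvMpOf (replacements : List (List String)) : PySem.Dict (List Char) (List Char) :=
  replacements.foldl
    (fun d p => match p with
      | [k, v] => d.insert k.toList v.toList
      | _ => d)                                         -- unreachable under Pre_
    PySem.Dict.empty

def applySubstitutions (replacements : List (List String)) (text : String) : String :=
  String.ofList (pvExpandA (pvDfsA (replacements.length + 1) (pvMpOf replacements) PySem.Set.empty)
    PySem.Dict.empty text.toList).1

-- ===== PORT B =====
-- a token: one literal character, or a %var% reference
inductive PvTok
  | lit : Char → PvTok
  | var : List Char → PvTok
deriving DecidableEq, Repr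

def pvTokenize (cs : List Char) : List PvTok :=
  match cs with
  | [] => []
  | c :: rest =>
    if c = '%' then
      let name := rest.takeWhile (· ≠ '%')
      if name.length < rest.length ∧ name ≠ [] then
        PvTok.var name :: pvTokenize (rest.drop (name.length + 1))
      else
        PvTok.lit '%' :: pvTokenize rest
    else
      PvTok.lit c :: pvTokenize rest
termination_by cs.length
decreasing_by all_goals (simp only [List.length_drop, List.length_cons]; omega)

def pvTableOf (replacements : List (List String)) : PySem.Dict (List Char) (List PvTok) :=
  replacements.foldl
    (fun d p => match p with
      | [k, v] => d.insert k.toList (pvTokenize v.toList)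
      | _ => d)                                         -- unreachable under Pre_
    PySem.Dict.empty

-- B's expand: one pass over the precomputed token list, dfs callback for var tokens
def pvExpandB
    (dfsf : PySem.Dict (List Char) (List Char) → List Char →
      List Char × PySem.Dict (List Char) (List Char))
    (memo : PySem.Dict (List Char) (List Char)) (toks : List PvTok) :
    List Char × PySem.Dict (List Char) (List Char) :=
  match toks with
  | [] => ([], memo)
  | PvTok.lit c :: ts =>
    let q := pvExpandB dfsf memo ts
    (c :: q.1, q.2)
  | PvTok.var v :: ts =>
    let p := dfsf memo v
    let q := pvExpandB dfsf p.2 ts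
    (p.1 ++ q.1, q.2)

def pvDfsB (fuel : Nat) (table : PySem.Dict (List Char) (List PvTok))
    (vis : PySem.Set (List Char)) (memo : PySem.Dict (List Char) (List Char))
    (var : List Char) : List Char × PySem.Dict (List Char) (List Char) :=
  match table.get? var with
  | none => ('%' :: var ++ ['%'], memo)
  | some toks =>
    match memo.get? var with
    | some r => (r, memo)
    | none =>
      if var ∈ vis then ('%' :: var ++ ['%'], memo)
      else
        match fuel with
        | 0 => ([], memo)                               -- unreachable with the chosen fuel
        | f + 1 =>
          let p := pvExpandB (pvDfsB f table (PySem.Set.add vis var)) memo toks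
          (p.1, p.2.insert var p.1)

def applySubstitutions_alt (replacements : List (List String)) (text : String) : String :=
  String.ofList (pvExpandB (pvDfsB (replacements.length + 1) (pvTableOf replacements) PySem.Set.empty)
    PySem.Dict.empty (pvTokenize text.toList)).1

-- ===== PRECONDITION & SPEC =====
-- Pre_ excludes inner lists whose length ≠ 2, on which Python's 'for k, v in replacements' raises ValueError.
def Pre_applySubstitutions (replacements : List (List String)) (text : String) : Prop :=
  ∀ p ∈ replacements, p.length = 2
instance (replacements : List (List String)) (text : String) : Decidable (Pre_applySubstitutions replacements text) := by unfold Pre_applySubstitutions; infer_instance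

def pvWitness_applySubstitutions : List (List String) × String :=
  ([["a", "x%b%"], ["b", "y"]], "go %a%%%")

def Spec_applySubstitutions (replacements : List (List String)) (text : String) (out : String) : Prop := out = applySubstitutions_alt replacements text
instance (replacements : List (List String)) (text : String) (out : String) : Decidable (Spec_applySubstitutions replacements text out) := by unfold Spec_applySubstitutions; infer_instance

-- ===== CLAIM (what is proved, stated in full; the proofs are below) =====
def Claim_equal_applySubstitutions : Prop := ∀ (replacements : List (List String)) (text : String), Dom_applySubstitutions replacements text → Pre_applySubstitutions replacements text → Spec_applySubstitutions replacements text (applySubstitutions replacements text)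

-- ===== LEMMAS AND PROOFS =====

-- the two dicts built by the two folds are pointwise related by pvTokenize
theorem pv_fold_rel (reps : List (List String))
    (dA : PySem.Dict (List Char) (List Char)) (dT : PySem.Dict (List Char) (List PvTok))
    (h : ∀ x, dT.get? x = (dA.get? x).map pvTokenize) :
    ∀ x, (reps.foldl (fun d p => match p with | [k, v] => d.insert k.toList (pvTokenize v.toList) | _ => d) dT).get? x
      = ((reps.foldl (fun d p => match p with | [k, v] => d.insert k.toList v.toList | _ => d) dA).get? x).map pvTokenize := by
  induction reps generalizing dA dT with
  | nil => exact h
  | cons p rest ih =>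
    match p with
    | [] => exact ih dA dT h
    | [k] => exact ih dA dT h
    | [k, v] =>
      refine ih _ _ (fun x => ?_)
      rw [PySem.Dict.get?_insert, PySem.Dict.get?_insert]
      split <;> simp [h]
    | k :: v :: w :: t => exact ih dA dT h

theorem pv_table_rel (reps : List (List String)) (x : List Char) :
    (pvTableOf reps).get? x = ((pvMpOf reps).get? x).map pvTokenize := by
  unfold pvTableOf pvMpOf
  exact pv_fold_rel reps PySem.Dict.empty PySem.Dict.empty
    (fun y => by simp [PySem.Dict.get?_empty]) x

-- scanning a string and walking its token list agree, given pointwise-equal dfs callbacks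
theorem pvExpand_eq
    (dfsf dfsg : PySem.Dict (List Char) (List Char) → List Char →
      List Char × PySem.Dict (List Char) (List Char))
    (h : ∀ memo v, dfsf memo v = dfsg memo v)
    (memo : PySem.Dict (List Char) (List Char)) (cs : List Char) :
    pvExpandA dfsf memo cs = pvExpandB dfsg memo (pvTokenize cs) := by
  match cs with
  | [] => simp only [pvExpandA, pvExpandB, pvTokenize]
  | c :: rest =>
    simp only [pvExpandA, pvTokenize]
    by_cases hc : c = '%'
    · rw [if_pos hc, if_pos hc]
      by_cases h1 : (rest.takeWhile (· ≠ '%')).length < rest.length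
      · by_cases h2 : rest.takeWhile (· ≠ '%') = []
        · have ih := pvExpand_eq dfsf dfsg h memo rest
          rw [if_pos h1, if_neg (fun hh => hh h2),
            if_neg (fun hh : (rest.takeWhile (· ≠ '%')).length < rest.length ∧ rest.takeWhile (· ≠ '%') ≠ [] => hh.2 h2)]
          simp only [pvExpandB]
          rw [ih]
        · have ihd := pvExpand_eq dfsf dfsg h
            (dfsg memo (rest.takeWhile (· ≠ '%'))).2
            (rest.drop ((rest.takeWhile (· ≠ '%')).length + 1))
          rw [if_pos h1, if_pos h2, if_pos (And.intro h1 h2)]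
          simp only [pvExpandB]
          rw [h memo (rest.takeWhile (· ≠ '%')), ihd]
      · have ih := pvExpand_eq dfsf dfsg h memo rest
        rw [if_neg h1,
          if_neg (fun hh : (rest.takeWhile (· ≠ '%')).length < rest.length ∧ rest.takeWhile (· ≠ '%') ≠ [] => h1 hh.1)]
        simp only [pvExpandB]
        rw [ih]
    · have ih := pvExpand_eq dfsf dfsg h memo rest
      rw [if_neg hc, if_neg hc]
      simp only [pvExpandB]
      rw [ih]
termination_by cs.length
decreasing_by all_goals (simp only [List.length_drop, List.length_cons]; omega)

theorem pvDfs_eq (fuel : Nat) (mp : PySem.Dict (List Char) (List Char))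
    (table : PySem.Dict (List Char) (List PvTok))
    (h : ∀ x, table.get? x = (mp.get? x).map pvTokenize)
    (vis : PySem.Set (List Char)) (memo : PySem.Dict (List Char) (List Char))
    (var : List Char) :
    pvDfsA fuel mp vis memo var = pvDfsB fuel table vis memo var := by
  induction fuel generalizing vis memo var with
  | zero =>
    cases hmp : mp.get? var with
    | none => simp [pvDfsA, pvDfsB, h var, hmp]
    | some val => simp [pvDfsA, pvDfsB, h var, hmp]
  | succ f ih =>
    cases hmp : mp.get? var with
    | none => simp [pvDfsA, pvDfsB, h var, hmp]
    | some val =>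
      cases hmemo : memo.get? var with
      | some r => simp [pvDfsA, pvDfsB, h var, hmp, hmemo]
      | none =>
        by_cases hv : var ∈ vis
        · simp [pvDfsA, pvDfsB, h var, hmp, hmemo, hv]
        · have he := pvExpand_eq (pvDfsA f mp (PySem.Set.add vis var))
            (pvDfsB f table (PySem.Set.add vis var))
            (fun memo' v => ih (PySem.Set.add vis var) memo' v) memo val
          rw [PySem.Set.add_of_not_mem hv] at he
          simp [pvDfsA, pvDfsB, h var, hmp, hmemo, hv, he]

-- ===== VERDICT (by name: the statement is the Claim_ definition above) =====
theorem applySubstitutions_spec : Claim_equal_applySubstitutions := by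
  intro reps text _hd _hp
  unfold Spec_applySubstitutions applySubstitutions applySubstitutions_alt
  rw [pvExpand_eq (pvDfsA (reps.length + 1) (pvMpOf reps) PySem.Set.empty)
    (pvDfsB (reps.length + 1) (pvTableOf reps) PySem.Set.empty)
    (fun memo v => pvDfs_eq (reps.length + 1) (pvMpOf reps) (pvTableOf reps)
      (pv_table_rel reps) PySem.Set.empty memo v)
    PySem.Dict.empty text.toList]
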